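-- pv_equiv track=rewrite | github.com/captbighead/Advent-of-Code-2023 | solutions/day15.py | do_part_two_for
-- ===== SOURCE A (Python) =====
-- def not_an_actual_hash(input_str):
-- 	current_value = 0
-- 	for c in input_str:
-- 		current_value += ord(c)
-- 		current_value *= 17
-- 		current_value %= 256
-- 	return current_value
--
-- def do_part_two_for(lines):
-- 	boxes = [{"bottom": 0} for i in range(256)]
-- 	sequence = lines[0].split(",")
-- 	for token in sequence:
-- 		# Equals operation
-- 		if token.find("=") + 1:
-- 			label, focal_length = token.split("=")
-- 			focal_length = int(focal_length)
--
-- 			# The box is a dict, storing lenses as a 2-element list of their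
-- 			# ordering within the box and their focal length. The left element
-- 			# is the ordering, and it's zero-indexed from top to bottom. The box
-- 			# also remembers the index at its bottom.
-- 			#
-- 			# The ordering values will not be contiguous, but they will be
-- 			# ordered
-- 			label_hash = not_an_actual_hash(label)
-- 			box = boxes[label_hash]
-- 			bottom = box["bottom"]
--
-- 			# If there is no lens with the label in the box, put it on the
-- 			# bottom of the box.
-- 			if not box.get(label, False):
-- 				box[label] = [bottom, focal_length]
-- 				box["bottom"] += 1
--
-- 			# If there is a lens with that label already in the box, replace the
-- 			# previous lens with the new one in the same place in the stack.
-- 			else: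
-- 				box[label][1] = focal_length
--
-- 		# Dash operation - we remove a lens of a given label. Technically,
-- 		# everything else is supposed to shuffle forward, but everything is
-- 		# still in the same order so we won't bog down the process by doing that
-- 		else:
-- 			label = token[:-1]
-- 			label_hash = not_an_actual_hash(label)
-- 			try:
-- 				boxes[label_hash].pop(label)
-- 			except KeyError:
-- 				pass	# If it's not in there then that's fine.
--
-- 	# Now we calculate the focusing power:
-- 	focusing_power = 0
-- 	for box_id, box in enumerate(boxes, 1):
-- 		box.pop("bottom")	# This is gonna make everything all weird
-- 		lenses = [t[1] for t in sorted([v for v in box.values()])]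
--
-- 		pass
-- 		for i, focal_length in enumerate(lenses, 1):
-- 			focusing_power += box_id * i * focal_length
-- 	return focusing_power
-- ===== SOURCE B (Python) =====
-- def not_an_actual_hash(input_str):
-- 	current_value = 0
-- 	for c in input_str:
-- 		current_value += ord(c)
-- 		current_value *= 17
-- 		current_value %= 256
-- 	return current_value
--
-- def do_part_two_for(lines):
-- 	# 256 plain dicts label -> focal_length; Python's insertion-order preservation
-- 	# replaces A's explicit ordering indices, sentinel "bottom" counter and final sort.
-- 	boxes = [dict() for _ in range(256)]
-- 	for token in lines[0].split(","):
-- 		if "=" in token: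
-- 			label, focal = token.split("=")
-- 			boxes[not_an_actual_hash(label)][label] = int(focal)
-- 		else:
-- 			label = token[:-1]
-- 			boxes[not_an_actual_hash(label)].pop(label, None)
-- 	return sum(box_id * slot * focal
-- 	           for box_id, box in enumerate(boxes, 1)
-- 	           for slot, focal in enumerate(box.values(), 1))
-- ===== Notes on version B (the rewrite author's own statement) =====
-- stated objective: simpler
-- what changed: B replaces A's heterogeneous boxes (a sentinel 'bottom' counter plus explicit per-lens ordering indices that are sorted at the end) with 256 plain label->focal dicts, relying on insertion-order preservation (in-place update keeps the slot, delete removes it) and a direct enumerate sum, dropping the counter and the final sort entirely.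
import Mathlib
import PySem

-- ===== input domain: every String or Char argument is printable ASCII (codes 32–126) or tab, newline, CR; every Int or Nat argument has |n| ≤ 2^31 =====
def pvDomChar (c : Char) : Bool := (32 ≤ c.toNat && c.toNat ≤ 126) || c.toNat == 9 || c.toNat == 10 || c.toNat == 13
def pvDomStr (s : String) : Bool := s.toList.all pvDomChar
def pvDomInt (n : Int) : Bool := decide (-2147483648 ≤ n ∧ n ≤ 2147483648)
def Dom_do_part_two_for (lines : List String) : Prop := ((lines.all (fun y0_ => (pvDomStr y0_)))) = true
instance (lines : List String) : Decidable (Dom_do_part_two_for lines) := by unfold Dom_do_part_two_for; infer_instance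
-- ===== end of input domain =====

-- B replaces A's sentinel-counter-plus-ordering-indices-plus-final-sort bookkeeping with plain
-- insertion-ordered label->focal dicts and a direct enumerate sum (objective: simpler).

-- shared module helper (A and B both call it in the Python module)
def not_an_actual_hash (input_str : String) : Int :=
  input_str.toList.foldl (fun current_value c =>
    PySem.Int.mod ((current_value + (c.toNat : Int)) * 17) 256) 0

-- ===== PORT A =====
-- A's box is a heterogeneous Python dict: the int counter under the sentinel key "bottom" plus
-- label -> [ordering, focal] lenses. Ported as the pair (bottom, lens dict); exact under
-- Pre_do_part_two_for, which excludes tokens whose label is the string "bottom" (A raises on those).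
def aStep (boxes : List (Int × PySem.Dict String (Int × Int))) (token : String) :
    List (Int × PySem.Dict String (Int × Int)) :=
  if PySem.Str.find token "=" + 1 ≠ 0 then
    match (PySem.Str.split? token "=").getD [] with
    | [label, fstr] =>
      let focal_length := (PySem.Int.ofStr? fstr).getD 0   -- int(...): some under Pre_
      let label_hash := (not_an_actual_hash label).toNat   -- hash is in [0, 256)
      let box := boxes.getD label_hash (0, PySem.Dict.empty)
      let bottom := box.1
      match box.2.get? label with                          -- box.get(label, False): a lens list is always truthy
      | none => boxes.set label_hash (bottom + 1, box.2.insert label (bottom, focal_length))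
      | some _ => boxes.set label_hash (bottom, box.2.modify label (0, 0) (fun t => (t.1, focal_length)))
    | _ => boxes                                           -- token.split("=") arity mismatch: Python raises, outside Pre_
  else
    let label := PySem.Str.slice token none (some (-1))    -- token[:-1]
    let label_hash := (not_an_actual_hash label).toNat
    let box := boxes.getD label_hash (0, PySem.Dict.empty)
    boxes.set label_hash (box.1, box.2.erase label)        -- pop(label) with try/except KeyError: pass

def do_part_two_for (lines : List String) : Int :=
  let sequence := (PySem.Str.split? (lines.headD "") ",").getD []   -- lines[0]: nonempty under Pre_
  let boxes := sequence.foldl aStep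
    (List.replicate 256 ((0 : Int), (PySem.Dict.empty : PySem.Dict String (Int × Int))))
  -- box.pop("bottom") is the counter component; the remaining values are the lenses,
  -- sorted by Python's list comparison (lexicographic on the [ordering, focal] pairs)
  (PySem.List.enumerate boxes 1).foldl (fun focusing_power bp =>
    let lenses := (PySem.List.sorted2 bp.2.2.values Prod.fst Prod.snd false).map Prod.snd
    (PySem.List.enumerate lenses 1).foldl (fun fp ip => fp + bp.1 * ip.1 * ip.2) focusing_power) 0

-- ===== PORT B =====
def bStep (boxes : List (PySem.Dict String Int)) (token : String) : List (PySem.Dict String Int) :=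
  if PySem.Str.isIn "=" token then
    match (PySem.Str.split? token "=").getD [] with
    | [label, fstr] =>
      let label_hash := (not_an_actual_hash label).toNat
      boxes.set label_hash
        ((boxes.getD label_hash PySem.Dict.empty).insert label ((PySem.Int.ofStr? fstr).getD 0))
    | _ => boxes
  else
    let label := PySem.Str.slice token none (some (-1))
    let label_hash := (not_an_actual_hash label).toNat
    boxes.set label_hash ((boxes.getD label_hash PySem.Dict.empty).erase label)  -- pop(label, None)

def do_part_two_for_alt (lines : List String) : Int :=
  let boxes := ((PySem.Str.split? (lines.headD "") ",").getD []).foldl bStep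
    (List.replicate 256 (PySem.Dict.empty : PySem.Dict String Int))
  ((PySem.List.enumerate boxes 1).map (fun bp =>
    ((PySem.List.enumerate bp.2.values 1).map (fun ip => bp.1 * ip.1 * ip.2)).sum)).sum

-- ===== PRECONDITION & SPEC =====
-- the label a token addresses: the part before "=" for an '=' token, token[:-1] otherwise
def tokLabel (t : String) : String :=
  if PySem.Str.isIn "=" t then ((PySem.Str.split? t "=").getD []).headD ""
  else PySem.Str.slice t none (some (-1))

-- an '=' token must split into exactly two pieces with an int()-parseable focal length
def tokParses (t : String) : Bool :=
  !PySem.Str.isIn "=" t ||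
    (match (PySem.Str.split? t "=").getD [] with
     | [_, fstr] => (PySem.Int.ofStr? fstr).isSome
     | _ => false)

def tokOK (t : String) : Bool := (tokLabel t != "bottom") && tokParses t

-- Pre_ excludes exactly the inputs where the Python A raises: empty lines (IndexError on lines[0]),
-- '=' tokens malformed for tuple-unpacking/int() (ValueError), and tokens whose label is the literal
-- string "bottom" (A clobbers its sentinel counter there and raises TypeError/KeyError).
def Pre_do_part_two_for (lines : List String) : Prop :=
  lines ≠ [] ∧ ((PySem.Str.split? (lines.headD "") ",").getD []).all tokOK = true
instance (lines : List String) : Decidable (Pre_do_part_two_for lines) := by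
  unfold Pre_do_part_two_for; infer_instance

def pvWitness_do_part_two_for : List String := ["rn=1,cm-,qp=3,cm=2,qp-,pc=4,ot=9,ab=5,pc-,pc=6,ot=7"]

def Spec_do_part_two_for (lines : List String) (out : Int) : Prop := out = do_part_two_for_alt lines
instance (lines : List String) (out : Int) : Decidable (Spec_do_part_two_for lines out) := by
  unfold Spec_do_part_two_for; infer_instance

-- ===== CLAIM (what is proved, stated in full; the proofs are below) =====
def Claim_equal_do_part_two_for : Prop := ∀ (lines : List String),
  Dom_do_part_two_for lines → Pre_do_part_two_for lines →
    Spec_do_part_two_for lines (do_part_two_for lines)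
-- ===== LEMMAS AND PROOFS =====

-- invariant tying one of A's boxes to the corresponding box of B: same labels in the same order
-- with the same focal lengths; A's ordering indices strictly increase along the box and stay
-- below its counter; labels are unique.
def BoxRel (a : Int × PySem.Dict String (Int × Int)) (b : PySem.Dict String Int) : Prop :=
  b.items = a.2.items.map (fun p => (p.1, p.2.2)) ∧
  (a.2.items.map (fun p => p.2.1)).Pairwise (· < ·) ∧
  (∀ p ∈ a.2.items, p.2.1 < a.1) ∧
  a.2.keys.Nodup

lemma boxRel_empty : BoxRel (0, PySem.Dict.empty) PySem.Dict.empty := by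
  refine ⟨rfl, by simp [PySem.Dict.empty], by simp [PySem.Dict.empty], PySem.Dict.nodup_keys_empty⟩

lemma forall₂_replicate {α β : Type} {R : α → β → Prop} {a : α} {b : β} (h : R a b) :
    ∀ n, List.Forall₂ R (List.replicate n a) (List.replicate n b) := by
  intro n; induction n with
  | zero => simp
  | succ n ih => simpa [List.replicate_succ] using List.Forall₂.cons h ih

lemma forall₂_getD {α β : Type} {R : α → β → Prop} {as : List α} {bs : List β}
    (h : List.Forall₂ R as bs) {da : α} {db : β} (hd : R da db) (i : Nat) :
    R (as.getD i da) (bs.getD i db) := by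
  induction h generalizing i with
  | nil => simpa [List.getD] using hd
  | cons hx _ ih =>
    cases i with
    | zero => simpa [List.getD] using hx
    | succ i => simpa [List.getD] using ih i

lemma forall₂_set {α β : Type} {R : α → β → Prop} {as : List α} {bs : List β}
    (h : List.Forall₂ R as bs) {a : α} {b : β} (hab : R a b) (i : Nat) :
    List.Forall₂ R (as.set i a) (bs.set i b) := by
  induction h generalizing i with
  | nil => simp
  | cons hx hrest ih =>
    cases i with
    | zero => exact List.Forall₂.cons hab hrest
    | succ i => exact List.Forall₂.cons hx (ih i)

-- A tests '=' membership as token.find("=") + 1 (truthiness), B as '"=" in token'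
lemma eqCond (t : String) : (PySem.Str.find t "=" + 1 ≠ 0) ↔ PySem.Str.isIn "=" t = true := by
  rw [PySem.Str.isIn_iff_infix, ← PySem.Str.find_ne_neg_one_iff]
  omega

lemma boxRel_contains {a : Int × PySem.Dict String (Int × Int)} {b : PySem.Dict String Int}
    (h : BoxRel a b) (k : String) : b.contains k = a.2.contains k := by
  simp [PySem.Dict.contains, h.1, List.any_map, Function.comp_def]

-- a fold of insertBy over an already strictly ordered list appends in order
lemma foldl_insertBy_eq_append {α : Type} (lt : α → α → Bool) :
    ∀ (xs acc : List α), (∀ x ∈ xs, ∀ y ∈ acc, lt x y = false) →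
      xs.Pairwise (fun a b => lt b a = false) →
      xs.foldl (fun acc x => PySem.List.insertBy lt x acc) acc = acc ++ xs := by
  intro xs
  induction xs with
  | nil => intro acc _ _; simp
  | cons x xs ih =>
    intro acc hacc hpw
    rw [List.pairwise_cons] at hpw
    have h1 : PySem.List.insertBy lt x acc = acc ++ [x] :=
      PySem.List.insertBy_of_forall_not_before lt x acc (hacc x (by simp))
    have h2 : xs.foldl (fun acc x => PySem.List.insertBy lt x acc) (acc ++ [x]) = (acc ++ [x]) ++ xs := by
      refine ih (acc ++ [x]) ?_ hpw.2
      intro x' hx' y hy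
      rcases List.mem_append.mp hy with hy | hy
      · exact hacc x' (by simp [hx']) y hy
      · simp only [List.mem_singleton] at hy; subst hy; exact hpw.1 x' hx'
    simp only [List.foldl_cons, h1, h2, List.append_assoc, List.singleton_append]

lemma sorted2_eq_self {α : Type} (xs : List α) (k1 k2 : α → Int)
    (h : xs.Pairwise (fun a b => k1 a < k1 b)) :
    PySem.List.sorted2 xs k1 k2 false = xs := by
  show xs.foldl (fun acc x => PySem.List.insertBy _ x acc) [] = xs
  rw [foldl_insertBy_eq_append]
  · simp
  · simp
  · refine h.imp ?_
    intro a b hab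
    have h1 : ¬ (k1 b < k1 a) := by omega
    simp [h1, hab]

-- keys are unique, so an entry is determined by its key
lemma eq_of_mem_items_of_nodup {ν : Type} {l : List (String × ν)} (hnd : (l.map Prod.fst).Nodup)
    {p q : String × ν} (hp : p ∈ l) (hq : q ∈ l) (hk : p.1 = q.1) : p = q := by
  have := List.inj_on_of_nodup_map hnd hp hq (by exact hk)
  exact this

-- one rewriting step preserves the invariant on all 256 boxes
-- the '=' operation on a single box, fresh label: both append at the end
lemma boxRel_insert_fresh {a : Int × PySem.Dict String (Int × Int)} {b : PySem.Dict String Int}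
    (h : BoxRel a b) {label : String} (hget : a.2.get? label = none) (focal : Int) :
    BoxRel (a.1 + 1, a.2.insert label (a.1, focal)) (b.insert label focal) := by
  have hc : a.2.contains label = false := by
    rw [PySem.Dict.contains_eq_isSome_get?, hget]; rfl
  have hcb : b.contains label = false := by rw [boxRel_contains h, hc]
  have hnotmem : label ∉ a.2.keys := by
    intro hm
    rw [← PySem.Dict.contains_iff_mem_keys] at hm
    simp [hc] at hm
  refine ⟨?_, ?_, ?_, ?_⟩
  · rw [PySem.Dict.items_insert_of_not_contains _ _ hcb,
        PySem.Dict.items_insert_of_not_contains _ _ hc, List.map_append, h.1]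
    simp
  · rw [PySem.Dict.items_insert_of_not_contains _ _ hc, List.map_append]
    rw [List.pairwise_append]
    refine ⟨h.2.1, by simp, ?_⟩
    intro x hx y hy
    simp only [List.map_cons, List.map_nil, List.mem_singleton] at hy
    obtain ⟨p, hp, rfl⟩ := List.mem_map.mp hx
    subst hy
    exact h.2.2.1 p hp
  · rw [PySem.Dict.items_insert_of_not_contains _ _ hc]
    intro p hp
    rcases List.mem_append.mp hp with hp | hp
    · have := h.2.2.1 p hp; omega
    · simp only [List.mem_singleton] at hp; subst hp; simp
  · rw [PySem.Dict.keys_insert_of_not_contains _ _ hc]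
    rw [List.nodup_append]
    refine ⟨h.2.2.2, List.nodup_singleton _, ?_⟩
    intro x hx y hy
    simp only [List.mem_singleton] at hy
    subst hy
    exact fun heq => hnotmem (heq ▸ hx)

-- the '=' operation on an already present label: A rewrites the focal length in place
-- (keeping the ordering index), B overwrites the value in place
lemma boxRel_insert_existing {a : Int × PySem.Dict String (Int × Int)} {b : PySem.Dict String Int}
    (h : BoxRel a b) {label : String} {lens : Int × Int} (hget : a.2.get? label = some lens)
    (focal : Int) :
    BoxRel (a.1, a.2.modify label (0, 0) (fun t => (t.1, focal))) (b.insert label focal) := by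
  have hnd : (a.2.items.map Prod.fst).Nodup := h.2.2.2
  have hc : a.2.contains label = true := by
    rw [PySem.Dict.contains_eq_isSome_get?, hget]; rfl
  have hcb : b.contains label = true := by rw [boxRel_contains h, hc]
  have hmem : (label, lens) ∈ a.2.items :=
    (PySem.Dict.get?_eq_some_iff_mem_items _ _ _ hnd).mp hget
  have hgd : a.2.getD label (0, 0) = lens := by
    rw [PySem.Dict.getD, hget]; rfl
  have hkey : ∀ p ∈ a.2.items, p.1 = label → p = (label, lens) := by
    intro p hp hpk
    exact eq_of_mem_items_of_nodup hnd hp hmem hpk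
  have hitems : (a.2.modify label (0, 0) (fun t => (t.1, focal))).items
      = a.2.items.map (fun p => if (p.1 == label) = true then (label, (lens.1, focal)) else p) := by
    rw [PySem.Dict.modify, PySem.Dict.items_insert_of_contains _ _ hc, hgd]
  refine ⟨?_, ?_, ?_, ?_⟩
  · rw [PySem.Dict.items_insert_of_contains _ _ hcb, hitems, h.1, List.map_map, List.map_map]
    refine List.map_congr_left ?_
    intro p hp
    by_cases hpk : p.1 = label <;> simp [hpk]
  · rw [hitems, List.map_map]
    have : a.2.items.map ((fun p : String × (Int × Int) => p.2.1) ∘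
        (fun p => if (p.1 == label) = true then (label, (lens.1, focal)) else p))
        = a.2.items.map (fun p => p.2.1) := by
      refine List.map_congr_left ?_
      intro p hp
      by_cases hpk : p.1 = label
      · rw [hkey p hp hpk]
        simp
      · simp [hpk]
    rw [this]
    exact h.2.1
  · rw [hitems]
    intro p hp
    obtain ⟨q, hq, rfl⟩ := List.mem_map.mp hp
    by_cases hqk : q.1 = label
    · have hq2 := h.2.2.1 q hq
      rw [hkey q hq hqk] at hq2
      rw [hkey q hq hqk]
      simpa using hq2
    · simpa [hqk] using h.2.2.1 q hq
  · show ((a.2.modify label (0, 0) (fun t => (t.1, focal))).items.map Prod.fst).Nodup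
    rw [hitems, List.map_map]
    have : a.2.items.map (Prod.fst ∘
        (fun p => if (p.1 == label) = true then (label, (lens.1, focal)) else p))
        = a.2.items.map Prod.fst := by
      refine List.map_congr_left ?_
      intro p hp
      by_cases hpk : p.1 = label <;> simp [hpk]
    rw [this]
    exact hnd

-- the '-' operation: both sides drop the entry (A: pop with KeyError swallowed, B: pop(., None))
lemma boxRel_erase {a : Int × PySem.Dict String (Int × Int)} {b : PySem.Dict String Int}
    (h : BoxRel a b) (label : String) :
    BoxRel (a.1, a.2.erase label) (b.erase label) := by
  refine ⟨?_, ?_, ?_, ?_⟩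
  · show (b.erase label).items = _
    rw [PySem.Dict.erase, PySem.Dict.erase, h.1]
    simp only [List.filter_map]
    rfl
  · refine List.Pairwise.sublist (List.Sublist.map _ List.filter_sublist) h.2.1
  · intro p hp
    exact h.2.2.1 p (List.mem_of_mem_filter hp)
  · exact List.Nodup.sublist (List.Sublist.map _ List.filter_sublist) h.2.2.2

-- one rewriting step preserves the invariant on all 256 boxes
lemma stepRel {as : List (Int × PySem.Dict String (Int × Int))} {bs : List (PySem.Dict String Int)}
    (h : List.Forall₂ BoxRel as bs) {t : String} (_hok : tokOK t = true) :
    List.Forall₂ BoxRel (aStep as t) (bStep bs t) := by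
  unfold aStep bStep
  by_cases hin : PySem.Str.isIn "=" t = true
  · rw [if_pos ((eqCond t).mpr hin), if_pos hin]
    rcases hsp : (PySem.Str.split? t "=").getD [] with - | ⟨label, - | ⟨fstr, - | ⟨x, rest⟩⟩⟩
    · exact h
    · exact h
    · -- the two-piece arm
      simp only []
      have hbox := forall₂_getD h boxRel_empty (not_an_actual_hash label).toNat
      cases hget : ((as.getD (not_an_actual_hash label).toNat (0, PySem.Dict.empty)).2.get? label) with
      | none =>
        exact forall₂_set h (boxRel_insert_fresh hbox hget _) _
      | some lens =>
        exact forall₂_set h (boxRel_insert_existing hbox hget _) _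
    · exact h
  · rw [if_neg (fun hc => hin ((eqCond t).mp hc)), if_neg hin]
    exact forall₂_set h
      (boxRel_erase (forall₂_getD h boxRel_empty (not_an_actual_hash _).toNat) _) _

lemma foldSteps {toks : List String} {as : List (Int × PySem.Dict String (Int × Int))}
    {bs : List (PySem.Dict String Int)} (h : List.Forall₂ BoxRel as bs)
    (hall : toks.all tokOK = true) :
    List.Forall₂ BoxRel (toks.foldl aStep as) (toks.foldl bStep bs) := by
  induction toks generalizing as bs with
  | nil => simpa using h
  | cons t toks ih =>
    simp only [List.all_cons, Bool.and_eq_true] at hall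
    exact ih (stepRel h hall.1) hall.2

-- per-box: A's sort of the ordering-indexed lenses is the identity, and its inner loop is B's sum
lemma contrib {a : Int × PySem.Dict String (Int × Int)} {b : PySem.Dict String Int}
    (h : BoxRel a b) (c fp : Int) :
    (PySem.List.enumerate ((PySem.List.sorted2 a.2.values Prod.fst Prod.snd false).map Prod.snd) 1).foldl
        (fun fp2 ip => fp2 + c * ip.1 * ip.2) fp
      = fp + ((PySem.List.enumerate b.values 1).map (fun ip => c * ip.1 * ip.2)).sum := by
  have hpw : (a.2.values).Pairwise (fun p q : Int × Int => p.1 < q.1) := by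
    have h21 := h.2.1
    rw [List.pairwise_map] at h21
    simp only [PySem.Dict.values, List.pairwise_map]
    exact h21
  have hsorted := sorted2_eq_self a.2.values Prod.fst Prod.snd hpw
  have hvals : (a.2.values).map Prod.snd = b.values := by
    simp [PySem.Dict.values, h.1, List.map_map, Function.comp_def]
  rw [hsorted, hvals, PySem.List.foldl_add]

lemma outer {as : List (Int × PySem.Dict String (Int × Int))} {bs : List (PySem.Dict String Int)}
    (h : List.Forall₂ BoxRel as bs) : ∀ (s fp : Int),
    (PySem.List.enumerate as s).foldl (fun focusing_power bp =>
        (PySem.List.enumerate ((PySem.List.sorted2 bp.2.2.values Prod.fst Prod.snd false).map Prod.snd) 1).foldl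
          (fun fp2 ip => fp2 + bp.1 * ip.1 * ip.2) focusing_power) fp
      = fp + ((PySem.List.enumerate bs s).map (fun bp =>
          ((PySem.List.enumerate bp.2.values 1).map (fun ip => bp.1 * ip.1 * ip.2)).sum)).sum := by
  induction h with
  | nil => intro s fp; simp [PySem.List.enumerate]
  | cons hx hrest ih =>
    intro s fp
    rw [PySem.List.enumerate_cons, PySem.List.enumerate_cons]
    simp only [List.foldl_cons, List.map_cons, List.sum_cons]
    rw [contrib hx, ih]
    ring_nf

-- ===== VERDICT (by name: the statement is the Claim_ definition above) =====
theorem do_part_two_for_spec : Claim_equal_do_part_two_for := by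
  intro lines _ hpre
  obtain ⟨-, hall⟩ := hpre
  show do_part_two_for lines = do_part_two_for_alt lines
  have hrel := foldSteps (forall₂_replicate boxRel_empty 256) hall
  simp only [do_part_two_for, do_part_two_for_alt]
  rw [outer hrel 1 0, zero_add]
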